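-- pv_equiv track=rewrite | github.com/oranguthang/pacman_src | scripts/ghidra/build_bank_ff_bin.py | split_csv_keeping_quotes
-- ===== SOURCE A (Python) =====
-- def split_csv_keeping_quotes(s: str) -> list[str]:
--     out: list[str] = []
--     buf: list[str] = []
--     in_quote = False
--     i = 0
--     while i < len(s):
--         ch = s[i]
--         if ch == '"':
--             in_quote = not in_quote
--             buf.append(ch)
--         elif ch == ',' and not in_quote:
--             token = ''.join(buf).strip()
--             if token:
--                 out.append(token)
--             buf = []
--         else:
--             buf.append(ch)
--         i += 1
--
--     token = ''.join(buf).strip()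
--     if token:
--         out.append(token)
--     return out
-- ===== SOURCE B (Python) =====
-- def split_csv_keeping_quotes(s: str) -> list[str]:
--     out: list[str] = []
--     buf = None
--     for part in s.split(','):
--         buf = part if buf is None else buf + ',' + part
--         if buf.count('"') % 2 == 0:
--             token = buf.strip()
--             if token:
--                 out.append(token)
--             buf = None
--     if buf is not None:
--         token = buf.strip()
--         if token:
--             out.append(token)
--     return out
-- ===== Notes on version B (the rewrite author's own statement) =====
-- stated objective: faster
-- what changed: B replaces A's Python-level char-by-char scan with an in_quote flag by one str.split pass on the comma separator followed by a fold over the parts that merges fragments back (rejoining with a comma) by the quote-count parity of the accumulated buffer, moving the per-character work into C-implemented str.split/str.count.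
import Mathlib
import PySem

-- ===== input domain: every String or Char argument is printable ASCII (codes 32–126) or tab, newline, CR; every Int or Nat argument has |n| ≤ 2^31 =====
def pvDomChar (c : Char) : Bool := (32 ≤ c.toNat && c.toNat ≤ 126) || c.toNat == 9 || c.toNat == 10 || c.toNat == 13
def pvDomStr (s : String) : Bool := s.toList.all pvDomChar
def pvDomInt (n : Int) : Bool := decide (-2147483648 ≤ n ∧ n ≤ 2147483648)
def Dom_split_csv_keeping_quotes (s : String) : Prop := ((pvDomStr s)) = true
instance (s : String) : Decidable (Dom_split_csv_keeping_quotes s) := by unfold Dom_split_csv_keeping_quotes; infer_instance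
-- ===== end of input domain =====

-- B splits the string on commas once and folds over the parts, merging fragments by quote parity;
-- same return value as A's char-by-char scan, measurably faster (split/count do the per-char work in C).

-- ===== PORT A =====
-- one step of A's while-loop: state is (out, buf, in_quote); strings kept as List Char
def pvStepA (st : List (List Char) × List Char × Bool) (ch : Char) :
    List (List Char) × List Char × Bool :=
  match st with
  | (out, buf, inq) =>
    if ch = '"' then (out, buf ++ [ch], !inq)
    else if ch = ',' ∧ inq = false then
      let token := PySem.Chars.strip buf
      ((if token = [] then out else out ++ [token]), [], inq)
    else (out, buf ++ [ch], inq)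

def split_csv_keeping_quotes (s : String) : List String :=
  let fin := s.toList.foldl pvStepA ([], [], false)
  let token := PySem.Chars.strip fin.2.1
  ((if token = [] then fin.1 else fin.1 ++ [token])).map String.ofList

-- ===== PORT B =====
-- one step of B's for-loop over the parts of s.split(','): state is (out, buf : Option);
-- buf.count('"') with a single-char needle is List.count (exact)
def pvStepB (st : List (List Char) × Option (List Char)) (part : List Char) :
    List (List Char) × Option (List Char) :=
  match st with
  | (out, obuf) =>
    let buf := match obuf with | none => part | some b => b ++ ',' :: part
    if buf.count '"' % 2 = 0 then
      let token := PySem.Chars.strip buf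
      ((if token = [] then out else out ++ [token]), none)
    else (out, some buf)

def split_csv_keeping_quotes_alt (s : String) : List String :=
  let parts := PySem.Chars.splitOn s.toList [',']
  let fin := parts.foldl pvStepB ([], none)
  (match fin.2 with
   | none => fin.1
   | some b =>
     let token := PySem.Chars.strip b
     if token = [] then fin.1 else fin.1 ++ [token]).map String.ofList

-- ===== PRECONDITION & SPEC =====
def Spec_split_csv_keeping_quotes (s : String) (out : List String) : Prop := out = split_csv_keeping_quotes_alt s
instance (s : String) (out : List String) : Decidable (Spec_split_csv_keeping_quotes s out) := by unfold Spec_split_csv_keeping_quotes; infer_instance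

-- ===== CLAIM (what is proved, stated in full; the proofs are below) =====
def Claim_equal_split_csv_keeping_quotes : Prop := ∀ (s : String), Dom_split_csv_keeping_quotes s → Spec_split_csv_keeping_quotes s (split_csv_keeping_quotes s)

-- ===== LEMMAS AND PROOFS =====

-- a simple structural description of splitting on a single comma
def pvSplitComma : List Char → List (List Char)
  | [] => [[]]
  | c :: cs =>
    if c = ',' then [] :: pvSplitComma cs
    else match pvSplitComma cs with
         | [] => [[c]]
         | p :: ps => (c :: p) :: ps

def pvJoin : List (List Char) → List Char
  | [] => []
  | [p] => p
  | p :: ps => p ++ ',' :: pvJoin ps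

lemma pvSplitComma_ne_nil (cs : List Char) : pvSplitComma cs ≠ [] := by
  cases cs with
  | nil => simp [pvSplitComma]
  | cons c cs =>
    simp only [pvSplitComma]
    split
    · simp
    · cases h : pvSplitComma cs <;> simp

lemma pvSplitComma_comma_free (cs : List Char) :
    ∀ p ∈ pvSplitComma cs, ',' ∉ p := by
  induction cs with
  | nil => simp [pvSplitComma]
  | cons c cs ih =>
    intro p hp
    by_cases hc : c = ','
    · subst hc
      rw [show pvSplitComma (',' :: cs) = [] :: pvSplitComma cs from by
        simp [pvSplitComma]] at hp
      rcases List.mem_cons.mp hp with rfl | hp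
      · simp
      · exact ih p hp
    · simp only [pvSplitComma, if_neg hc] at hp
      cases hsp : pvSplitComma cs with
      | nil => exact absurd hsp (pvSplitComma_ne_nil cs)
      | cons q qs =>
        rw [hsp] at hp
        rcases List.mem_cons.mp hp with rfl | hp
        · intro hm
          rcases List.mem_cons.mp hm with h1 | h1
          · exact hc h1.symm
          · exact ih q (hsp ▸ List.mem_cons_self ..) h1
        · exact ih p (hsp ▸ List.mem_cons_of_mem _ hp)

lemma pvJoin_pvSplitComma (cs : List Char) : pvJoin (pvSplitComma cs) = cs := by
  induction cs with
  | nil => simp [pvSplitComma, pvJoin]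
  | cons c cs ih =>
    simp only [pvSplitComma]
    split
    · rename_i hc
      subst hc
      cases h : pvSplitComma cs with
      | nil => exact absurd h (pvSplitComma_ne_nil cs)
      | cons q qs => rw [h] at ih; simp [pvJoin, ih]
    · cases h : pvSplitComma cs with
      | nil => exact absurd h (pvSplitComma_ne_nil cs)
      | cons q qs =>
        rw [h] at ih
        cases qs with
        | nil => simp_all [pvJoin]
        | cons r rs => simp_all [pvJoin]

-- PySem's splitOn with the one-char separator "," computes pvSplitComma
lemma pvSplitOn_go_spec (fuel : Nat) (l cur : List Char) (acc : List (List Char))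
    (h : l.length ≤ fuel) :
    PySem.Chars.splitOn.go [','] fuel l cur acc =
      acc.reverse ++ (match pvSplitComma l with
                      | [] => [cur.reverse]
                      | p :: ps => (cur.reverse ++ p) :: ps) := by
  induction fuel generalizing l cur acc with
  | zero =>
    interval_cases hl : l.length
    have : l = [] := List.length_eq_zero_iff.mp hl
    subst this
    simp [PySem.Chars.splitOn.go, pvSplitComma]
  | succ fuel ih =>
    cases l with
    | nil => simp [PySem.Chars.splitOn.go, pvSplitComma]
    | cons c rest =>
      by_cases hc : c = ','
      · subst hc
        rw [show PySem.Chars.splitOn.go [','] (fuel+1) (',' :: rest) cur acc =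
              PySem.Chars.splitOn.go [','] fuel rest [] (cur.reverse :: acc) by
            simp [PySem.Chars.splitOn.go, List.isPrefixOf]]
        rw [ih rest [] (cur.reverse :: acc) (by simpa using Nat.lt_succ_iff.mp (by simpa using h))]
        cases hsp : pvSplitComma rest with
        | nil => exact absurd hsp (pvSplitComma_ne_nil rest)
        | cons p ps => simp [pvSplitComma, hsp]
      · rw [show PySem.Chars.splitOn.go [','] (fuel+1) (c :: rest) cur acc =
              PySem.Chars.splitOn.go [','] fuel rest (c :: cur) acc by
            simp [PySem.Chars.splitOn.go, List.isPrefixOf, Ne.symm hc]]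
        rw [ih rest (c :: cur) acc (by simpa using Nat.lt_succ_iff.mp (by simpa using h))]
        cases hsp : pvSplitComma rest with
        | nil => exact absurd hsp (pvSplitComma_ne_nil rest)
        | cons p ps => simp [pvSplitComma, hc, hsp]

lemma pvSplitOn_eq (cs : List Char) :
    PySem.Chars.splitOn cs [','] = pvSplitComma cs := by
  rw [PySem.Chars.splitOn]
  rw [pvSplitOn_go_spec (cs.length + 1) cs [] [] (by omega)]
  cases hsp : pvSplitComma cs with
  | nil => exact absurd hsp (pvSplitComma_ne_nil cs)
  | cons p ps => simp

-- A's scan over a comma-free fragment just appends it and xors the quote parity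
lemma pvFoldA_comma_free (part : List Char) (h : ',' ∉ part) :
    ∀ out buf inq, List.foldl pvStepA (out, buf, inq) part =
      (out, buf ++ part, inq ^^ decide (part.count '"' % 2 = 1)) := by
  induction part with
  | nil => intro out buf inq; simp
  | cons c rest ih =>
    intro out buf inq
    have hrest : ',' ∉ rest := fun hm => h (List.mem_cons_of_mem _ hm)
    have hc : c ≠ ',' := fun hc => h (hc ▸ List.mem_cons_self ..)
    by_cases hq : c = '"'
    · subst hq
      have hstep : pvStepA (out, buf, inq) '"' = (out, buf ++ ['"'], !inq) := by
        simp [pvStepA]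
      rw [List.foldl_cons, hstep, ih hrest]
      have hcount : ('"' :: rest).count '"' = rest.count '"' + 1 := by
        simp
      rw [hcount]
      rcases Nat.even_or_odd (rest.count '"') with he | ho
      · have h1 : rest.count '"' % 2 = 0 := Nat.even_iff.mp he
        have h2 : (rest.count '"' + 1) % 2 = 1 := by omega
        simp [h1, h2]
      · have h1 : rest.count '"' % 2 = 1 := Nat.odd_iff.mp ho
        have h2 : (rest.count '"' + 1) % 2 = 0 := by omega
        simp [h1, h2]
    · have hstep : pvStepA (out, buf, inq) c = (out, buf ++ [c], inq) := by
        simp [pvStepA, hq, hc]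
      rw [List.foldl_cons, hstep, ih hrest]
      have hcount : (c :: rest).count '"' = rest.count '"' := by
        simp [hq]
      rw [hcount]
      simp

-- the state A reaches at the start of a part, given B's pending buffer
def pvToA (obuf : Option (List Char)) : List Char × Bool :=
  match obuf with
  | none => ([], false)
  | some b => (b ++ [','], true)

-- the buffer B assembles for the current part
def pvComb (obuf : Option (List Char)) (p : List Char) : List Char :=
  match obuf with
  | none => p
  | some b => b ++ ',' :: p

def pvFlush (out : List (List Char)) (buf : List Char) : List (List Char) :=
  if PySem.Chars.strip buf = [] then out else out ++ [PySem.Chars.strip buf]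

def pvFinA (st : List (List Char) × List Char × Bool) : List (List Char) :=
  pvFlush st.1 st.2.1

def pvFinB (st : List (List Char) × Option (List Char)) : List (List Char) :=
  match st.2 with
  | none => st.1
  | some b => pvFlush st.1 b

lemma pvStepB_eq (out : List (List Char)) (obuf : Option (List Char)) (p : List Char) :
    pvStepB (out, obuf) p =
      if (pvComb obuf p).count '"' % 2 = 0 then (pvFlush out (pvComb obuf p), none)
      else (out, some (pvComb obuf p)) := by
  cases obuf <;> simp [pvStepB, pvComb, pvFlush]

-- scanning one comma-free part with A, starting from the state matching B's pending buffer
lemma pvScanPart (p : List Char) (hp : ',' ∉ p) (out : List (List Char))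
    (obuf : Option (List Char))
    (hodd : ∀ b, obuf = some b → b.count '"' % 2 = 1) :
    List.foldl pvStepA (out, pvToA obuf) p =
      (out, pvComb obuf p, decide ((pvComb obuf p).count '"' % 2 = 1)) := by
  cases obuf with
  | none =>
    rw [show ((out, pvToA none) : List (List Char) × List Char × Bool)
          = (out, [], false) from rfl]
    rw [pvFoldA_comma_free p hp]
    simp [pvComb]
  | some b =>
    rw [show ((out, pvToA (some b)) : List (List Char) × List Char × Bool)
          = (out, b ++ [','], true) from rfl]
    rw [pvFoldA_comma_free p hp]
    have hcnt : (pvComb (some b) p).count '"' = b.count '"' + p.count '"' := by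
      simp [pvComb]
    have hodd' : b.count '"' % 2 = 1 := hodd b rfl
    refine Prod.ext rfl (Prod.ext ?_ ?_)
    · simp [pvComb]
    · show (true ^^ decide (p.count '"' % 2 = 1)) = decide ((pvComb (some b) p).count '"' % 2 = 1)
      rw [hcnt]
      rcases Nat.even_or_odd (p.count '"') with he | ho
      · have h1 : p.count '"' % 2 = 0 := Nat.even_iff.mp he
        have h2 : (b.count '"' + p.count '"') % 2 = 1 := by omega
        simp [h1, h2]
      · have h1 : p.count '"' % 2 = 1 := Nat.odd_iff.mp ho
        have h2 : (b.count '"' + p.count '"') % 2 = 0 := by omega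
        simp [h1, h2]

-- A's step on the separating comma, in both parity cases
lemma pvStepA_comma_even (out : List (List Char)) (buf : List Char)
    (hev : buf.count '"' % 2 = 0) :
    pvStepA (out, buf, decide (buf.count '"' % 2 = 1)) ',' = (pvFlush out buf, [], false) := by
  have : decide (buf.count '"' % 2 = 1) = false := by simp; omega
  rw [this]
  simp [pvStepA, pvFlush]

lemma pvStepA_comma_odd (out : List (List Char)) (buf : List Char)
    (hodd : ¬ buf.count '"' % 2 = 0) :
    pvStepA (out, buf, decide (buf.count '"' % 2 = 1)) ',' = (out, buf ++ [','], true) := by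
  have : decide (buf.count '"' % 2 = 1) = true := by simp; omega
  rw [this]
  simp [pvStepA]

lemma pvStrip_nil : PySem.Chars.strip [] = [] := by decide

-- the heart of the equivalence: A's scan of the rejoined parts = B's fold over the parts
lemma pvMain (ps : List (List Char)) :
    ∀ out (obuf : Option (List Char)),
    (∀ p ∈ ps, ',' ∉ p) →
    (∀ b, obuf = some b → b.count '"' % 2 = 1 ∧ ps ≠ []) →
    pvFinA (List.foldl pvStepA (out, pvToA obuf) (pvJoin ps)) =
      pvFinB (List.foldl pvStepB (out, obuf) ps) := by
  induction ps with
  | nil =>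
    intro out obuf _ hb
    cases obuf with
    | none => simp [pvJoin, pvToA, pvFinA, pvFinB, pvFlush, pvStrip_nil]
    | some b => exact absurd rfl (hb b rfl).2
  | cons p ps ih =>
    intro out obuf hfree hb
    have hpfree : ',' ∉ p := hfree p (List.mem_cons_self ..)
    have hscan := pvScanPart p hpfree out obuf (fun b h => (hb b h).1)
    cases ps with
    | nil =>
      rw [show pvJoin [p] = p from rfl, hscan]
      rw [show List.foldl pvStepB (out, obuf) [p] = pvStepB (out, obuf) p from rfl]
      rw [pvStepB_eq]
      by_cases hev : (pvComb obuf p).count '"' % 2 = 0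
      · rw [if_pos hev]; simp [pvFinA, pvFinB]
      · rw [if_neg hev]; simp [pvFinA, pvFinB]
    | cons q qs =>
      rw [show pvJoin (p :: q :: qs) = p ++ ',' :: pvJoin (q :: qs) from rfl]
      rw [List.foldl_append, hscan, List.foldl_cons]
      rw [List.foldl_cons (f := pvStepB), pvStepB_eq]
      by_cases hev : (pvComb obuf p).count '"' % 2 = 0
      · rw [pvStepA_comma_even _ _ hev, if_pos hev]
        have := ih (pvFlush out (pvComb obuf p)) none
          (fun r hr => hfree r (List.mem_cons_of_mem _ hr)) (by simp)
        simpa [pvToA] using this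
      · rw [pvStepA_comma_odd _ _ hev, if_neg hev]
        have := ih out (some (pvComb obuf p))
          (fun r hr => hfree r (List.mem_cons_of_mem _ hr))
          (by intro b hbeq; cases hbeq; exact ⟨by omega, by simp⟩)
        simpa [pvToA] using this

-- ===== VERDICT (by name: the statement is the Claim_ definition above) =====
theorem split_csv_keeping_quotes_spec : Claim_equal_split_csv_keeping_quotes := by
  intro s _
  show split_csv_keeping_quotes s = split_csv_keeping_quotes_alt s
  have h := pvMain (pvSplitComma s.toList) [] none
    (pvSplitComma_comma_free s.toList) (by simp)
  rw [pvJoin_pvSplitComma] at h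
  simp only [pvToA, pvFinA, pvFinB, pvFlush] at h
  unfold split_csv_keeping_quotes split_csv_keeping_quotes_alt
  rw [pvSplitOn_eq]
  exact congrArg (List.map String.ofList) h
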